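-- pv_equiv track=rewrite | github.com/Hironobu-Kawaguchi/atcoder | atcoder/past201912_f.py | low2up
-- ===== SOURCE A (Python) =====
-- def low2up(s):
--     res = ''
--     for i in range(len(s)):
--         if i == 0 or i == len(s)-1:
--             res += s[i].upper()
--         else:
--             res += s[i]
--     return res
-- ===== SOURCE B (Python) =====
-- def low2up(s):
--     lst = list(s)
--     if lst:
--         lst[0] = lst[0].upper()
--         lst[-1] = lst[-1].upper()
--     return ''.join(lst)
-- ===== Notes on version B (the rewrite author's own statement) =====
-- stated objective: simpler
-- what changed: Replaces A's per-index scan with a branch at every position by direct endpoint assignment on a list of characters (uppercase index 0 and -1, which coincide for length 1) followed by a single join.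
import Mathlib
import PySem

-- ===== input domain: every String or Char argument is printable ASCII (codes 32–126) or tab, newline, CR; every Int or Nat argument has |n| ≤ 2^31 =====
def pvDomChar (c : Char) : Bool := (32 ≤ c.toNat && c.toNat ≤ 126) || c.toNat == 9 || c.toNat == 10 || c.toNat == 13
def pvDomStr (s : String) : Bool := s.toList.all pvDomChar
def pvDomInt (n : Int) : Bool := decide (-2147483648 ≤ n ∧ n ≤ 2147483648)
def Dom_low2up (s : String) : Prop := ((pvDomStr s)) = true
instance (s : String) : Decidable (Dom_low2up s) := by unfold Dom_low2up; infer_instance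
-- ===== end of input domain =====

-- B uppercases the two endpoints of the character list directly (index 0 and -1, which coincide for length 1) and joins once, instead of A's per-index scan with a branch at every position.

-- ===== PORT A =====
def low2up (s : String) : String :=
  let cs := s.toList
  String.mk ((PySem.List.pyRange 0 (PySem.Str.len s) 1).foldl
    (fun res i =>
      if i == 0 || i == PySem.Str.len s - 1
      then res ++ [PySem.Chars.upperChar (PySem.List.pyGetD cs i ' ')]
      else res ++ [PySem.List.pyGetD cs i ' '])
    [])

-- ===== PORT B =====
def low2up_alt (s : String) : String :=
  let lst := s.toList
  let lst2 :=
    if lst.isEmpty then lst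
    else
      let l1 := PySem.List.pySetD lst 0 (PySem.Chars.upperChar (PySem.List.pyGetD lst 0 ' '))
      PySem.List.pySetD l1 (-1) (PySem.Chars.upperChar (PySem.List.pyGetD l1 (-1) ' '))
  String.mk lst2

-- ===== PRECONDITION & SPEC =====
def Spec_low2up (s : String) (out : String) : Prop := out = low2up_alt s
instance (s : String) (out : String) : Decidable (Spec_low2up s out) := by unfold Spec_low2up; infer_instance

-- ===== CLAIM (what is proved, stated in full; the proofs are below) =====
def Claim_equal_low2up : Prop := ∀ (s : String), Dom_low2up s → Spec_low2up s (low2up s)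

-- ===== LEMMAS AND PROOFS =====

-- Python's lst[-1] = v on a non-empty list sets the last position.
theorem pySetD_neg_one {α : Type} (xs : List α) (v : α) (h : xs ≠ []) :
    PySem.List.pySetD xs (-1) v = xs.set (xs.length - 1) v := by
  have h1 : 1 ≤ xs.length := List.length_pos_iff.2 h
  simp [PySem.List.pySetD, PySem.List.pySet?, PySem.List.pyIdx?, h1]

theorem charOfNat_toNat (n : Nat) (h : n < 55296) : (Char.ofNat n).toNat = n := by
  rw [Char.ofNat, dif_pos (Or.inl h : Nat.isValidChar n)]
  simp [Char.ofNatAux, Char.toNat]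

theorem upperChar_idem (c : Char) : PySem.Chars.upperChar (PySem.Chars.upperChar c) = PySem.Chars.upperChar c := by
  unfold PySem.Chars.upperChar PySem.Chars.islower
  split
  · next h =>
    simp only [Bool.and_eq_true, decide_eq_true_eq, Char.le_def] at h
    have hlo : 97 ≤ c.val.toNat := h.1
    have hhi : c.val.toNat ≤ 122 := h.2
    have h6 : c.toNat = c.val.toNat := rfl
    rw [if_neg]
    simp only [Bool.and_eq_true, decide_eq_true_eq, Char.le_def, not_and]
    intro h3
    exfalso
    have h4 : 97 ≤ (Char.ofNat (c.toNat - 32)).val.toNat := h3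
    have h5 : (Char.ofNat (c.toNat - 32)).toNat = c.toNat - 32 := charOfNat_toNat _ (by omega)
    have h7 : (Char.ofNat (c.toNat - 32)).toNat = (Char.ofNat (c.toNat - 32)).val.toNat := rfl
    omega
  · rfl

-- Pointwise comparison of A's index map with B's two endpoint writes, non-empty case.
theorem low2up_list (c : Char) (t : List Char) :
    (List.map (fun i => if (i == 0 || i == ((c :: t).length : Int) - 1) = true
        then PySem.Chars.upperChar (PySem.List.pyGetD (c :: t) i ' ')
        else PySem.List.pyGetD (c :: t) i ' ')
      (List.map (fun k => ((k : Nat) : Int)) (List.range (c :: t).length)))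
    = PySem.List.pySetD (PySem.List.pySetD (c :: t) 0 (PySem.Chars.upperChar (PySem.List.pyGetD (c :: t) 0 ' '))) (-1)
         (PySem.Chars.upperChar (PySem.List.pyGetD (PySem.List.pySetD (c :: t) 0 (PySem.Chars.upperChar (PySem.List.pyGetD (c :: t) 0 ' '))) (-1) ' ')) := by
  rw [List.map_map]
  rw [PySem.List.pySetD_of_nonneg _ _ le_rfl, PySem.List.pyGetD_zero_cons]
  have hset0 : (c :: t).set (0:Int).toNat (PySem.Chars.upperChar c) = PySem.Chars.upperChar c :: t := by simp
  rw [hset0]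
  have hne : (PySem.Chars.upperChar c :: t) ≠ [] := List.cons_ne_nil _ _
  rw [PySem.List.pyGetD_neg_one _ _ hne, pySetD_neg_one _ _ hne]
  apply List.ext_getElem
  · simp
  · intro k hk1 hk2
    have hkn : k < t.length + 1 := by simpa using hk1
    simp only [List.getElem_map, List.getElem_range, Function.comp_apply]
    have hgd : PySem.List.pyGetD (c :: t) ((k : Nat) : Int) ' ' = (c :: t)[k] := by
      rw [PySem.List.pyGetD_natCast]
      exact List.getD_eq_getElem _ _ (by simpa using hkn)
    rw [List.getElem_set, hgd]
    simp only [List.length_cons, Nat.add_sub_cancel]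
    have hcond : (((k : Int) == 0 || (k : Int) == ((t.length + 1 : Nat) : Int) - 1) = true)
        ↔ (k = 0 ∨ k = t.length) := by
      simp only [Bool.or_eq_true, beq_iff_eq]
      push_cast
      omega
    by_cases hc : k = 0 ∨ k = t.length
    · rw [if_pos (hcond.2 hc)]
      by_cases hl : t.length = k
      · rw [if_pos hl]
        by_cases h0 : k = 0
        · subst h0
          have ht : t = [] := List.length_eq_zero_iff.1 hl
          subst ht
          simp [upperChar_idem]
        · subst hl
          congr 1
          rw [List.getLast_cons (fun hh => h0 (by simp [hh]))]
          rw [List.getLast_eq_getElem, List.getElem_cons, dif_neg h0]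
      · have h0 : k = 0 := by
          rcases hc with h | h
          · exact h
          · exact absurd h.symm hl
        subst h0
        rw [if_neg hl]
        simp
    · rw [if_neg (fun hh => hc (hcond.1 hh))]
      have hl : ¬ t.length = k := fun hh => hc (Or.inr hh.symm)
      rw [if_neg hl]
      have h0 : k ≠ 0 := fun hh => hc (Or.inl hh)
      rw [List.getElem_cons, dif_neg h0, List.getElem_cons, dif_neg h0]

theorem low2up_list_all (cs : List Char) :
    (List.map (fun i => if (i == 0 || i == (cs.length : Int) - 1) = true
        then PySem.Chars.upperChar (PySem.List.pyGetD cs i ' ')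
        else PySem.List.pyGetD cs i ' ')
      (List.map (fun k => ((k : Nat) : Int)) (List.range cs.length)))
    = (if cs.isEmpty then cs
       else PySem.List.pySetD (PySem.List.pySetD cs 0 (PySem.Chars.upperChar (PySem.List.pyGetD cs 0 ' '))) (-1)
         (PySem.Chars.upperChar (PySem.List.pyGetD (PySem.List.pySetD cs 0 (PySem.Chars.upperChar (PySem.List.pyGetD cs 0 ' '))) (-1) ' '))) := by
  cases cs with
  | nil => simp
  | cons c t =>
    rw [if_neg (by simp)]
    exact low2up_list c t

theorem low2up_eq (s : String) : low2up s = low2up_alt s := by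
  unfold low2up low2up_alt
  simp only
  rw [PySem.List.foldl_congr_mem _ _
    (fun res i => res ++ [if (i == 0 || i == PySem.Str.len s - 1) then PySem.Chars.upperChar (PySem.List.pyGetD s.toList i ' ') else PySem.List.pyGetD s.toList i ' '])
    _ (by intro acc x hx; exact (apply_ite (fun y => acc ++ [y]) _ _ _).symm)]
  rw [PySem.List.foldl_append_singleton_eq_map]
  simp only [PySem.Str.len_eq, List.nil_append]
  rw [PySem.List.pyRange_zero_natCast]
  exact congrArg String.mk (low2up_list_all s.toList)

-- ===== VERDICT (by name: the statement is the Claim_ definition above) =====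
theorem low2up_spec : Claim_equal_low2up := by
  intro s _
  exact low2up_eq s
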